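-- pv_equiv track=rewrite | github.com/3bl3gamer/chiastat | chia/gen_chia_structs.py | make_type_def
-- ===== SOURCE A (Python) =====
-- def is_class_type_name(name):
--     return name != 'List' and name != 'Optional' and name[0] == name[0].upper()
--
-- def make_type_def(ann_items):
--     if len(ann_items) == 0:
--         return ''
--     def get_next_def():
--         t = ann_items[0]
--         if t == 'bool':
--             return 'bool'
--         if t == 'uint8':
--             return 'uint8'
--         if t == 'uint32':
--             return 'uint32'
--         if t == 'uint64':
--             return 'uint64'
--         if t == 'uint128':
--             return '*big.Int'
--         if t == 'bytes32':
--             return '[32]byte'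
--         if t == 'bytes100':
--             return '[100]byte'
--         if t == 'bytes':
--             return '[]byte'
--         if t == 'List':
--             return '[]'
--         if t == 'Optional':
--             return '*' if is_class_type_name(ann_items[1]) else ''
--         if is_class_type_name(t):
--             return t
--         raise ValueError(f'unexpected type {t} in {ann_items}')
--     return get_next_def() + make_type_def(ann_items[1:])
-- ===== SOURCE B (Python) =====
-- GO_TYPES = {
--     'bool': 'bool',
--     'uint8': 'uint8',
--     'uint32': 'uint32',
--     'uint64': 'uint64',
--     'uint128': '*big.Int',
--     'bytes32': '[32]byte',
--     'bytes100': '[100]byte',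
--     'bytes': '[]byte',
--     'List': '[]',
-- }
--
-- def is_class_type_name(name):
--     return name != 'List' and name != 'Optional' and name[0] == name[0].upper()
--
-- def make_type_def(ann_items):
--     parts = []
--     for i in range(len(ann_items)):
--         t = ann_items[i]
--         if t in GO_TYPES:
--             parts.append(GO_TYPES[t])
--         elif t == 'Optional':
--             parts.append('*' if is_class_type_name(ann_items[i + 1]) else '')
--         elif is_class_type_name(t):
--             parts.append(t)
--         else:
--             raise ValueError(f'unexpected type {t} in {ann_items[i:]}')
--     return ''.join(parts)
-- ===== Notes on version B (the rewrite author's own statement) =====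
-- stated objective: simpler
-- what changed: Replaced A's slice-and-recurse (get_next_def closure plus recursion on ann_items[1:]) with a single indexed loop that maps each token through a dict table and joins the collected fragments.
import Mathlib
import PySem

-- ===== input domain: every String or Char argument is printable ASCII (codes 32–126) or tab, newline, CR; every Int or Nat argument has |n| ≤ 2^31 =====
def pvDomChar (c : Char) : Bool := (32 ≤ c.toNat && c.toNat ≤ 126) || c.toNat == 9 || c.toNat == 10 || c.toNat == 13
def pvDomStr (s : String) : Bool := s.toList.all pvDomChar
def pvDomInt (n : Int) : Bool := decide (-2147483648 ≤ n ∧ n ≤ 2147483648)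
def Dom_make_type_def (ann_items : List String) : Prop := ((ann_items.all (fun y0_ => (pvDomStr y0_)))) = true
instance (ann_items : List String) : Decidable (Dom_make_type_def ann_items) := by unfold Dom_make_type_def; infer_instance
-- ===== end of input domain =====

-- B replaces A's slice-and-recurse with a single indexed loop over range(len) mapping each
-- token through a table and joining the fragments (objective: simpler/idiomatic, same cost).

-- ===== PORT A =====
-- name[0] == name[0].upper(): exact on the ASCII domain via PySem.Chars.upperChar;
-- empty name (Python IndexError) is excluded by Pre_ and ported as false.
def pyIsClass (name : String) : Bool :=
  name ≠ "List" && name ≠ "Optional" &&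
    (match name.toList with
     | [] => false
     | c :: _ => c == PySem.Chars.upperChar c)

-- get_next_def on the full list ann (t = ann[0]); the ValueError branch and the
-- IndexError of ann_items[1] are outside Pre_ and ported as "".
def getNextDefA (t : String) (ann : List String) : String :=
  if t == "bool" then "bool"
  else if t == "uint8" then "uint8"
  else if t == "uint32" then "uint32"
  else if t == "uint64" then "uint64"
  else if t == "uint128" then "*big.Int"
  else if t == "bytes32" then "[32]byte"
  else if t == "bytes100" then "[100]byte"
  else if t == "bytes" then "[]byte"
  else if t == "List" then "[]"
  else if t == "Optional" then
    (if pyIsClass ((PySem.List.pyGet? ann 1).getD "") then "*" else "")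
  else if pyIsClass t then t
  else ""

def make_type_def (ann_items : List String) : String :=
  match ann_items with
  | [] => ""
  | t :: rest => getNextDefA t (t :: rest) ++ make_type_def rest

-- ===== PORT B =====
def isClassB (name : String) : Bool :=
  name ≠ "List" && name ≠ "Optional" &&
    (match name.toList with
     | [] => false
     | c :: _ => c == PySem.Chars.upperChar c)

def goTypes : PySem.Dict String String :=
  PySem.Dict.mk [("bool", "bool"), ("uint8", "uint8"), ("uint32", "uint32"), ("uint64", "uint64"),
   ("uint128", "*big.Int"), ("bytes32", "[32]byte"), ("bytes100", "[100]byte"),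
   ("bytes", "[]byte"), ("List", "[]")]

-- the loop body: fragment for index i (raising branches outside Pre_ ported as "")
def fragB (ann : List String) (i : Nat) : String :=
  let t := (PySem.List.pyGet? ann (i : Int)).getD ""
  match PySem.Dict.get? goTypes t with
  | some v => v
  | none =>
    if t == "Optional" then
      (if isClassB ((PySem.List.pyGet? ann ((i : Int) + 1)).getD "") then "*" else "")
    else if isClassB t then t
    else ""

def make_type_def_alt (ann_items : List String) : String :=
  PySem.Str.join "" ((List.range ann_items.length).map (fragB ann_items))

-- ===== PRECONDITION & SPEC =====
-- Pre_ excludes exactly the inputs on which A raises: a token that is neither a known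
-- keyword nor a class-type name (ValueError; the empty string also raises IndexError),
-- and 'Optional' as the last token or followed by an empty string (IndexError).
def pvKeyword (t : String) : Bool :=
  t == "bool" || t == "uint8" || t == "uint32" || t == "uint64" || t == "uint128" ||
  t == "bytes32" || t == "bytes100" || t == "bytes" || t == "List" || t == "Optional"

def Pre_make_type_def (ann_items : List String) : Prop :=
  ∀ i, (h : i < ann_items.length) →
    (pvKeyword ann_items[i] = true ∨ pyIsClass ann_items[i] = true) ∧
    (ann_items[i] = "Optional" → i + 1 < ann_items.length ∧ ann_items[i + 1]! ≠ "")

instance (ann_items : List String) : Decidable (Pre_make_type_def ann_items) := by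
  unfold Pre_make_type_def; infer_instance

def pvWitness_make_type_def : List String := ["List", "Optional", "Coin", "uint128"]

def Spec_make_type_def (ann_items : List String) (out : String) : Prop := out = make_type_def_alt ann_items
instance (ann_items : List String) (out : String) : Decidable (Spec_make_type_def ann_items out) := by unfold Spec_make_type_def; infer_instance

-- ===== CLAIM (what is proved, stated in full; the proofs are below) =====
def Claim_equal_make_type_def : Prop := ∀ (ann_items : List String), Dom_make_type_def ann_items → Pre_make_type_def ann_items → Spec_make_type_def ann_items (make_type_def ann_items)

-- ===== LEMMAS AND PROOFS =====

theorem pvWitness_ok :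
    Dom_make_type_def pvWitness_make_type_def ∧ Pre_make_type_def pvWitness_make_type_def := by
  decide

theorem join_empty_cons (a : String) (l : List String) :
    PySem.Str.join "" (a :: l) = a ++ PySem.Str.join "" l := by
  cases l with
  | nil => simp [PySem.Str.join, PySem.Chars.join, List.intercalate]
  | cons b m => simp [PySem.Str.join, PySem.Chars.join_cons_cons]

theorem fragB_succ (t : String) (rest : List String) (i : Nat) :
    fragB (t :: rest) (i + 1) = fragB rest i := by
  have e1 : PySem.List.pyGet? (t :: rest) ((i + 1 : Nat) : Int) = PySem.List.pyGet? rest (i : Int) := by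
    rw [PySem.List.pyGet?_natCast, PySem.List.pyGet?_natCast]; simp
  have e2 : PySem.List.pyGet? (t :: rest) (((i + 1 : Nat) : Int) + 1)
      = PySem.List.pyGet? rest ((i : Int) + 1) := by
    have c1 : ((i + 1 : Nat) : Int) + 1 = ((i + 2 : Nat) : Int) := by push_cast; ring
    have c2 : ((i : Int) + 1) = ((i + 1 : Nat) : Int) := by push_cast; ring
    rw [c1, c2, PySem.List.pyGet?_natCast, PySem.List.pyGet?_natCast]; simp
  simp only [fragB, e1, e2]

theorem fragB_zero (t : String) (rest : List String) :
    fragB (t :: rest) 0 = getNextDefA t (t :: rest) := by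
  have h0 : PySem.List.pyGet? (t :: rest) ((0 : Nat) : Int) = some t := by
    simp
  have h1 : PySem.List.pyGet? (t :: rest) (((0 : Nat) : Int) + 1) = PySem.List.pyGet? rest 0 := by
    norm_num
    simp [PySem.List.pyGet?, PySem.List.pyIdx?]
    split <;> simp
  have g1 : PySem.List.pyGet? (t :: rest) (1 : Int) = PySem.List.pyGet? rest 0 := by
    simp [PySem.List.pyGet?, PySem.List.pyIdx?]
    split <;> simp
  have hic : isClassB = pyIsClass := rfl
  simp only [fragB, h0, Option.getD_some, h1, getNextDefA, g1, hic]
  rcases eq_or_ne t "bool" with rfl | b1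
  · simp [goTypes, PySem.Dict.get?_mk_cons]
  rcases eq_or_ne t "uint8" with rfl | b2
  · simp [goTypes, PySem.Dict.get?_mk_cons]
  rcases eq_or_ne t "uint32" with rfl | b3
  · simp [goTypes, PySem.Dict.get?_mk_cons]
  rcases eq_or_ne t "uint64" with rfl | b4
  · simp [goTypes, PySem.Dict.get?_mk_cons]
  rcases eq_or_ne t "uint128" with rfl | b5
  · simp [goTypes, PySem.Dict.get?_mk_cons]
  rcases eq_or_ne t "bytes32" with rfl | b6
  · simp [goTypes, PySem.Dict.get?_mk_cons]
  rcases eq_or_ne t "bytes100" with rfl | b7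
  · simp [goTypes, PySem.Dict.get?_mk_cons]
  rcases eq_or_ne t "bytes" with rfl | b8
  · simp [goTypes, PySem.Dict.get?_mk_cons]
  rcases eq_or_ne t "List" with rfl | b9
  · simp [goTypes, PySem.Dict.get?_mk_cons]
  rcases eq_or_ne t "Optional" with rfl | b10
  · simp [goTypes, PySem.Dict.get?]
  simp [goTypes, PySem.Dict.get?, Ne.symm b1, Ne.symm b2, Ne.symm b3, Ne.symm b4, Ne.symm b5,
    Ne.symm b6, Ne.symm b7, Ne.symm b8, Ne.symm b9, b1, b2, b3, b4, b5, b6, b7,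
    b8, b9, b10]

theorem alt_cons (t : String) (rest : List String) :
    make_type_def_alt (t :: rest) = getNextDefA t (t :: rest) ++ make_type_def_alt rest := by
  unfold make_type_def_alt
  rw [List.length_cons, List.range_succ_eq_map, List.map_cons, join_empty_cons,
    fragB_zero, List.map_map]
  congr 1
  apply congrArg
  apply List.map_congr_left
  intro i _
  exact fragB_succ t rest i

-- ===== VERDICT (by name: the statement is the Claim_ definition above) =====
theorem ab_eq (ann : List String) : make_type_def ann = make_type_def_alt ann := by
  induction ann with
  | nil => rfl
  | cons t rest ih => rw [make_type_def, alt_cons, ih]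

theorem make_type_def_spec : Claim_equal_make_type_def := by
  intro ann _ _
  exact ab_eq ann
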